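-- pv_equiv track=rewrite | github.com/Mute10/python-practice | tempCode.py | planet2
-- ===== SOURCE A (Python) =====
-- def planet2(Saturn, Mars):
--   timeFlow = 1  #initialization
--   timeStop = 3**4
--   result = 0
--   for s in Saturn: #all values are interated #outer loop
--    for m in Mars: #then all of mars values are #inner loop this goes first.
--     if s >= 0 and m >= 0: #does this each iteration of m then s.
--      timeFlow += 1
--      result += 2
--      timeStop + timeFlow * result * 3 #has no effect
--    else:
--      continue
--   return timeStop + timeFlow + result * 4  #so timeStop is 81, timeflow becomes 21 and result becomes 40 multiply is by 4 and you get 262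
-- ===== SOURCE B (Python) =====
-- def planet2(Saturn, Mars):
--     k = sum(1 for s in Saturn if s >= 0) * sum(1 for m in Mars if m >= 0)
--     return 82 + 9 * k
-- ===== Notes on version B (the rewrite author's own statement) =====
-- stated objective: faster
-- what changed: Replaced the nested O(n*m) accumulation loops by counting nonnegatives in each list once and using the closed form 82 + 9 * countS * countM.
import Mathlib
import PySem

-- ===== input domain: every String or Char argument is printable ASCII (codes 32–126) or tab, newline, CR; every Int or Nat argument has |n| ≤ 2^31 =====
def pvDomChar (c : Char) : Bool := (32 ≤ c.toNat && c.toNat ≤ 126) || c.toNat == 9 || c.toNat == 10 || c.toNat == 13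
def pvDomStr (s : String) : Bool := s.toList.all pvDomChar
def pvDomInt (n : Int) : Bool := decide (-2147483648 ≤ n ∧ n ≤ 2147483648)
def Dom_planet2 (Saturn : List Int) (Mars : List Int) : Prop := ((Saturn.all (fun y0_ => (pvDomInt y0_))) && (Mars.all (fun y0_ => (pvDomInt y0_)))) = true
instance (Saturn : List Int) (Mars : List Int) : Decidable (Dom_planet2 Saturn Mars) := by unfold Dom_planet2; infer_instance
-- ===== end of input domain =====

-- B replaces A's nested accumulation loops by counting nonnegatives in each list and a closed form (faster, asymptotic).


-- ===== PORT A =====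
-- state: (timeFlow, result); the dead expression `timeStop + timeFlow * result * 3` has no effect and is not part of the state
def planet2 (Saturn : List Int) (Mars : List Int) : Int :=
  let timeStop : Int := 3 ^ 4
  let st :=
    Saturn.foldl (fun st s =>
      Mars.foldl (fun st m =>
        if s ≥ 0 ∧ m ≥ 0 then (st.1 + 1, st.2 + 2) else st) st) ((1 : Int), (0 : Int))
  timeStop + st.1 + st.2 * 4

-- ===== PORT B =====
def planet2_alt (Saturn : List Int) (Mars : List Int) : Int :=
  let k : Int := ((Saturn.filter (fun s => s ≥ 0)).length : Int) * ((Mars.filter (fun m => m ≥ 0)).length : Int)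
  82 + 9 * k

-- ===== PRECONDITION & SPEC =====
def Spec_planet2 (Saturn : List Int) (Mars : List Int) (out : Int) : Prop := out = planet2_alt Saturn Mars
instance (Saturn : List Int) (Mars : List Int) (out : Int) : Decidable (Spec_planet2 Saturn Mars out) := by unfold Spec_planet2; infer_instance

-- ===== CLAIM (what is proved, stated in full; the proofs are below) =====
def Claim_equal_planet2 : Prop := ∀ (Saturn : List Int) (Mars : List Int), Dom_planet2 Saturn Mars → Spec_planet2 Saturn Mars (planet2 Saturn Mars)

-- ===== LEMMAS AND PROOFS =====

-- the inner Mars loop adds (c, 2c) to the state when s ≥ 0, where c = number of nonnegative elements of Mars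
theorem planet2_inner (Mars : List Int) (s : Int) (t r : Int) :
    Mars.foldl (fun st m => if s ≥ 0 ∧ m ≥ 0 then (st.1 + 1, st.2 + 2) else st) (t, r)
      = if s ≥ 0 then (t + ((Mars.filter (fun m => m ≥ 0)).length : Int),
                       r + 2 * ((Mars.filter (fun m => m ≥ 0)).length : Int))
        else (t, r) := by
  induction Mars generalizing t r with
  | nil => simp
  | cons m ms ih =>
    rw [List.foldl_cons]
    by_cases hs : s ≥ 0
    · by_cases hm : m ≥ 0
      · rw [if_pos ⟨hs, hm⟩, ih, if_pos hs]
        refine Prod.ext ?_ ?_ <;>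
          (simp only [List.filter_cons, hm, hs, decide_true, if_true, if_pos, List.length_cons]; push_cast; ring)
      · rw [if_neg (by tauto), ih, if_pos hs, if_pos hs]
        simp [List.filter_cons, hm]
    · rw [if_neg (by tauto), ih, if_neg hs, if_neg hs]

-- the outer loop accumulates cS * cM
theorem planet2_outer (Saturn : List Int) (Mars : List Int) (t r : Int) :
    Saturn.foldl (fun st s =>
        Mars.foldl (fun st m => if s ≥ 0 ∧ m ≥ 0 then (st.1 + 1, st.2 + 2) else st) st) (t, r)
      = (t + ((Saturn.filter (fun s => s ≥ 0)).length : Int) * ((Mars.filter (fun m => m ≥ 0)).length : Int),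
         r + 2 * ((Saturn.filter (fun s => s ≥ 0)).length : Int) * ((Mars.filter (fun m => m ≥ 0)).length : Int)) := by
  induction Saturn generalizing t r with
  | nil => simp
  | cons s ss ih =>
    rw [List.foldl_cons, planet2_inner]
    by_cases hs : s ≥ 0
    · rw [if_pos hs, ih]
      refine Prod.ext ?_ ?_ <;>
        (simp only [List.filter_cons, hs, decide_true, if_true, List.length_cons]; push_cast; ring)
    · rw [if_neg hs, ih]
      simp only [List.filter_cons, hs, decide_false]
      simp

-- ===== VERDICT (by name: the statement is the Claim_ definition above) =====
theorem planet2_spec : Claim_equal_planet2 := by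
  intro Saturn Mars _
  unfold Spec_planet2 planet2 planet2_alt
  rw [planet2_outer]
  push_cast
  ring
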